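-- pv_equiv track=rewrite | github.com/mkucukkoc/pdf-read-avenia | main.py | parse_ppt_prompt
-- ===== SOURCE A (Python) =====
-- def parse_ppt_prompt(text: str):
--     slides = []
--     current_slide = {"title": "", "content": "", "image": ""}
--
--     for line in text.splitlines():
--         line = line.strip()
--         if line.lower().startswith("# slide"):
--             if current_slide["title"] or current_slide["content"]:
--                 slides.append(current_slide)
--             current_slide = {"title": "", "content": "", "image": ""}
--         elif line.lower().startswith("title:"):
--             current_slide["title"] = line.split(":", 1)[1].strip()
--         elif line.lower().startswith("content:"):
--             current_slide["content"] = line.split(":", 1)[1].strip()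
--         elif line.lower().startswith("image:"):
--             current_slide["image"] = line.split(":", 1)[1].strip()
--
--     if current_slide["title"] or current_slide["content"]:
--         slides.append(current_slide)
--
--     return slides
-- ===== SOURCE B (Python) =====
-- def parse_ppt_prompt(text: str):
--     # Pass 1: partition stripped lines into blocks separated by '# slide' headers
--     # (the lines before the first header form the initial block).
--     blocks = []
--     cur = []
--     for ln in [raw.strip() for raw in text.splitlines()]:
--         if ln.lower().startswith("# slide"):
--             blocks.append(cur)
--             cur = []
--         else:
--             cur.append(ln)
--     blocks.append(cur)
--
--     def field(block, prefix):
--         # value of the last line of the block carrying this field (last one wins)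
--         vals = [ln.split(":", 1)[1].strip()
--                 for ln in block if ln.lower().startswith(prefix)]
--         return vals[-1] if vals else ""
--
--     slides = []
--     for block in blocks:
--         slide = {"title": field(block, "title:"),
--                  "content": field(block, "content:"),
--                  "image": field(block, "image:")}
--         if slide["title"] or slide["content"]:
--             slides.append(slide)
--     return slides
-- ===== Notes on version B (the rewrite author's own statement) =====
-- stated objective: alternative
-- what changed: Replaces A's single inline-flushing pass with a two-phase structure: first partition the stripped lines into blocks at '# slide' headers, then map each block to a slide by taking, per field, the last matching 'title:'/'content:'/'image:' line, keeping slides with a non-empty title or content.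
import Mathlib
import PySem

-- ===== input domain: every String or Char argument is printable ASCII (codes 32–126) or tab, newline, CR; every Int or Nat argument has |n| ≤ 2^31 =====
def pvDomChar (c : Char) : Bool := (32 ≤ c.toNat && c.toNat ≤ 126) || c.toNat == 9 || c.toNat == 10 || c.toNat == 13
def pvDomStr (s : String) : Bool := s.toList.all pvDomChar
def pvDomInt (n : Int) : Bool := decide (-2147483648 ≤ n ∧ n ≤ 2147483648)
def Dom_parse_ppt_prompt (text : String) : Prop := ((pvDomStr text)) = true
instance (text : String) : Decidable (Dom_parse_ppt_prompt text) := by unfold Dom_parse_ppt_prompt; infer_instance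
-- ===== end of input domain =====

-- B replaces A's single inline-flushing pass by a partition-into-blocks pass followed by a
-- per-block field extraction (last matching line wins); same O(n) cost, different decomposition.

-- line.split(":", 1)[1].strip() — exact whenever the line contains ':' (guaranteed by the
-- 'startswith "…:"' guards under which both programs evaluate it)
def pvExt (line : String) : String :=
  PySem.Str.strip (((PySem.Str.splitMax? line ":" 1).getD []).getD 1 "")

-- ===== PORT A =====
def pvInitSlide : PySem.Dict String String :=
  PySem.Dict.ofList [("title", ""), ("content", ""), ("image", "")]

def pvFlushCond (cur : PySem.Dict String String) : Bool :=
  ((cur.get? "title").getD "") != "" || ((cur.get? "content").getD "") != ""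

def parse_ppt_prompt (text : String) : List (List (String × String)) :=
  let fin := (PySem.Str.splitlines text).foldl
    (fun (st : List (List (String × String)) × PySem.Dict String String) raw =>
      if PySem.Str.startswith (PySem.Str.lower (PySem.Str.strip raw)) "# slide" then
        ((if pvFlushCond st.2 then st.1 ++ [st.2.items] else st.1), pvInitSlide)
      else if PySem.Str.startswith (PySem.Str.lower (PySem.Str.strip raw)) "title:" then
        (st.1, st.2.insert "title" (pvExt (PySem.Str.strip raw)))
      else if PySem.Str.startswith (PySem.Str.lower (PySem.Str.strip raw)) "content:" then
        (st.1, st.2.insert "content" (pvExt (PySem.Str.strip raw)))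
      else if PySem.Str.startswith (PySem.Str.lower (PySem.Str.strip raw)) "image:" then
        (st.1, st.2.insert "image" (pvExt (PySem.Str.strip raw)))
      else st)
    ([], pvInitSlide)
  if pvFlushCond fin.2 then fin.1 ++ [fin.2.items] else fin.1

-- ===== PORT B =====
-- field(block, prefix): value of the last line of the block matching the prefix, else ""
def pvField (block : List String) (pre : String) : String :=
  match ((block.filter
      (fun ln => PySem.Str.startswith (PySem.Str.lower ln) pre)).map pvExt).getLast? with
  | some v => v
  | none => ""

def pvSlideDict (block : List String) : PySem.Dict String String :=
  PySem.Dict.ofList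
    [("title", pvField block "title:"), ("content", pvField block "content:"),
     ("image", pvField block "image:")]

def parse_ppt_prompt_alt (text : String) : List (List (String × String)) :=
  let bc := ((PySem.Str.splitlines text).map PySem.Str.strip).foldl
    (fun (st : List (List String) × List String) ln =>
      if PySem.Str.startswith (PySem.Str.lower ln) "# slide" then (st.1 ++ [st.2], [])
      else (st.1, st.2 ++ [ln]))
    ([], [])
  (bc.1 ++ [bc.2]).foldl
    (fun slides block =>
      if (((pvSlideDict block).get? "title").getD "") != ""
          || (((pvSlideDict block).get? "content").getD "") != "" then
        slides ++ [(pvSlideDict block).items]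
      else slides)
    []

-- ===== PRECONDITION & SPEC =====
def Spec_parse_ppt_prompt (text : String) (out : List (List (String × String))) : Prop := out = parse_ppt_prompt_alt text
instance (text : String) (out : List (List (String × String))) : Decidable (Spec_parse_ppt_prompt text out) := by unfold Spec_parse_ppt_prompt; infer_instance

-- ===== CLAIM (what is proved, stated in full; the proofs are below) =====
def Claim_equal_parse_ppt_prompt : Prop := ∀ (text : String), Dom_parse_ppt_prompt text → Spec_parse_ppt_prompt text (parse_ppt_prompt text)

-- ===== LEMMAS AND PROOFS =====

-- abbreviations for the three prefix tests and the header test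
def pvHdr (ln : String) : Bool := PySem.Str.startswith (PySem.Str.lower ln) "# slide"
def pvIsT (ln : String) : Bool := PySem.Str.startswith (PySem.Str.lower ln) "title:"
def pvIsC (ln : String) : Bool := PySem.Str.startswith (PySem.Str.lower ln) "content:"
def pvIsI (ln : String) : Bool := PySem.Str.startswith (PySem.Str.lower ln) "image:"

-- A's current_slide as a triple, and its per-line (non-header) update
def pvUpd (s : String × String × String) (ln : String) : String × String × String :=
  if pvIsT ln then (pvExt ln, s.2.1, s.2.2)
  else if pvIsC ln then (s.1, pvExt ln, s.2.2)
  else if pvIsI ln then (s.1, s.2.1, pvExt ln)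
  else s

def pvMk (s : String × String × String) : List (String × String) :=
  [("title", s.1), ("content", s.2.1), ("image", s.2.2)]

def pvFlush (s : String × String × String) : List (List (String × String)) :=
  if s.1 != "" || s.2.1 != "" then [pvMk s] else []

def pvDictOf (s : String × String × String) : PySem.Dict String String :=
  PySem.Dict.ofList [("title", s.1), ("content", s.2.1), ("image", s.2.2)]

-- A's loop on the triple state
def pvStepA (st : List (List (String × String)) × (String × String × String)) (ln : String) :
    List (List (String × String)) × (String × String × String) :=
  if pvHdr ln then (st.1 ++ pvFlush st.2, ("", "", "")) else (st.1, pvUpd st.2 ln)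

-- B's blocks, recursively from the front
def pvBlocksOf : List String → List (List String)
  | [] => [[]]
  | ln :: ls =>
    if pvHdr ln then [] :: pvBlocksOf ls
    else
      match pvBlocksOf ls with
      | [] => [[ln]]
      | b :: bs => (ln :: b) :: bs

def pvParseFrom (s : String × String × String) : List (List String) → List (List (String × String))
  | [] => []
  | b :: bs => pvFlush (b.foldl pvUpd s) ++ pvParseFrom ("", "", "") bs

theorem pvBlocksOf_ne_nil (ls : List String) : pvBlocksOf ls ≠ [] := by
  cases ls with
  | nil => simp [pvBlocksOf]
  | cons ln ls =>
    simp only [pvBlocksOf]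
    split
    · simp
    · split <;> simp

theorem pvBlocksOf_cons_ex (ls : List String) : ∃ b bs, pvBlocksOf ls = b :: bs := by
  cases hx : pvBlocksOf ls with
  | nil => exact absurd hx (pvBlocksOf_ne_nil ls)
  | cons b bs => exact ⟨b, bs, rfl⟩

-- the dict state always has shape pvDictOf, and A's fold is the triple fold on stripped lines
theorem pvA_dict (L : List String) (S : List (List (String × String))) (s : String × String × String) :
    L.foldl (fun (st : List (List (String × String)) × PySem.Dict String String) raw =>
      if PySem.Str.startswith (PySem.Str.lower (PySem.Str.strip raw)) "# slide" then
        ((if pvFlushCond st.2 then st.1 ++ [st.2.items] else st.1), pvInitSlide)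
      else if PySem.Str.startswith (PySem.Str.lower (PySem.Str.strip raw)) "title:" then
        (st.1, st.2.insert "title" (pvExt (PySem.Str.strip raw)))
      else if PySem.Str.startswith (PySem.Str.lower (PySem.Str.strip raw)) "content:" then
        (st.1, st.2.insert "content" (pvExt (PySem.Str.strip raw)))
      else if PySem.Str.startswith (PySem.Str.lower (PySem.Str.strip raw)) "image:" then
        (st.1, st.2.insert "image" (pvExt (PySem.Str.strip raw)))
      else st) (S, pvDictOf s)
    = (let r := L.foldl (fun x y => pvStepA x (PySem.Str.strip y)) (S, s); (r.1, pvDictOf r.2)) := by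
  induction L generalizing S s with
  | nil => rfl
  | cons raw ls ih =>
    simp only [List.foldl_cons]
    by_cases h : pvHdr (PySem.Str.strip raw) = true
    · have h1 : (if pvFlushCond (pvDictOf s) = true then S ++ [(pvDictOf s).items] else S)
          = S ++ pvFlush s := by
        have h2 : pvFlushCond (pvDictOf s) = (s.1 != "" || s.2.1 != "") := rfl
        rw [h2]
        unfold pvFlush
        split <;> simp [show (pvDictOf s).items = pvMk s from rfl]
      have hstep : pvStepA (S, s) (PySem.Str.strip raw) = (S ++ pvFlush s, ("", "", "")) := by
        simp [pvStepA, h]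
      have h' : PySem.Str.startswith (PySem.Str.lower (PySem.Str.strip raw)) "# slide" = true := h
      simp only [h', if_pos, h1, hstep]
      exact ih (S ++ pvFlush s) ("", "", "")
    · have h' : PySem.Str.startswith (PySem.Str.lower (PySem.Str.strip raw)) "# slide" = false := by
        simpa [pvHdr] using h
      by_cases hT : pvIsT (PySem.Str.strip raw) = true
      · have hT' : PySem.Str.startswith (PySem.Str.lower (PySem.Str.strip raw)) "title:" = true := hT
        have hins : (pvDictOf s).insert "title" (pvExt (PySem.Str.strip raw))
            = pvDictOf (pvExt (PySem.Str.strip raw), s.2.1, s.2.2) := rfl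
        have hstep : pvStepA (S, s) (PySem.Str.strip raw)
            = (S, (pvExt (PySem.Str.strip raw), s.2.1, s.2.2)) := by
          simp [pvStepA, pvUpd, h, hT]
        simp only [h', Bool.false_eq_true, if_false, hT', if_pos, hins, hstep]
        exact ih S _
      · have hT' : PySem.Str.startswith (PySem.Str.lower (PySem.Str.strip raw)) "title:" = false := by
          simpa [pvIsT] using hT
        by_cases hC : pvIsC (PySem.Str.strip raw) = true
        · have hC' : PySem.Str.startswith (PySem.Str.lower (PySem.Str.strip raw)) "content:" = true := hC
          have hins : (pvDictOf s).insert "content" (pvExt (PySem.Str.strip raw))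
              = pvDictOf (s.1, pvExt (PySem.Str.strip raw), s.2.2) := rfl
          have hstep : pvStepA (S, s) (PySem.Str.strip raw)
              = (S, (s.1, pvExt (PySem.Str.strip raw), s.2.2)) := by
            simp [pvStepA, pvUpd, h, hT, hC]
          simp only [h', hT', Bool.false_eq_true, if_false, hC', if_pos, hins, hstep]
          exact ih S _
        · have hC' : PySem.Str.startswith (PySem.Str.lower (PySem.Str.strip raw)) "content:" = false := by
            simpa [pvIsC] using hC
          by_cases hI : pvIsI (PySem.Str.strip raw) = true
          · have hI' : PySem.Str.startswith (PySem.Str.lower (PySem.Str.strip raw)) "image:" = true := hI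
            have hins : (pvDictOf s).insert "image" (pvExt (PySem.Str.strip raw))
                = pvDictOf (s.1, s.2.1, pvExt (PySem.Str.strip raw)) := rfl
            have hstep : pvStepA (S, s) (PySem.Str.strip raw)
                = (S, (s.1, s.2.1, pvExt (PySem.Str.strip raw))) := by
              simp [pvStepA, pvUpd, h, hT, hC, hI]
            simp only [h', hT', hC', Bool.false_eq_true, if_false, hI', if_pos, hins, hstep]
            exact ih S _
          · have hI' : PySem.Str.startswith (PySem.Str.lower (PySem.Str.strip raw)) "image:" = false := by
              simpa [pvIsI] using hI
            have hstep : pvStepA (S, s) (PySem.Str.strip raw) = (S, s) := by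
              simp [pvStepA, pvUpd, h, hT, hC, hI]
            simp only [h', hT', hC', hI', Bool.false_eq_true, if_false, hstep]
            exact ih S s

theorem pvA_dict0 (L : List String) :
    L.foldl (fun (st : List (List (String × String)) × PySem.Dict String String) raw =>
      if PySem.Str.startswith (PySem.Str.lower (PySem.Str.strip raw)) "# slide" then
        ((if pvFlushCond st.2 then st.1 ++ [st.2.items] else st.1), pvInitSlide)
      else if PySem.Str.startswith (PySem.Str.lower (PySem.Str.strip raw)) "title:" then
        (st.1, st.2.insert "title" (pvExt (PySem.Str.strip raw)))
      else if PySem.Str.startswith (PySem.Str.lower (PySem.Str.strip raw)) "content:" then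
        (st.1, st.2.insert "content" (pvExt (PySem.Str.strip raw)))
      else if PySem.Str.startswith (PySem.Str.lower (PySem.Str.strip raw)) "image:" then
        (st.1, st.2.insert "image" (pvExt (PySem.Str.strip raw)))
      else st) ([], pvInitSlide)
    = (let r := L.foldl (fun x y => pvStepA x (PySem.Str.strip y)) ([], ("", "", ""));
       (r.1, pvDictOf r.2)) :=
  pvA_dict L [] ("", "", "")

-- A's triple fold, finished by the final flush, is the block-wise parse
theorem pvA_blocks (L : List String) (S : List (List (String × String))) (s : String × String × String) :
    (L.foldl pvStepA (S, s)).1 ++ pvFlush (L.foldl pvStepA (S, s)).2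
      = S ++ pvParseFrom s (pvBlocksOf L) := by
  induction L generalizing S s with
  | nil => simp [pvBlocksOf, pvParseFrom]
  | cons ln ls ih =>
    simp only [List.foldl_cons]
    by_cases h : pvHdr ln = true
    · have hstep : pvStepA (S, s) ln = (S ++ pvFlush s, ("", "", "")) := by
        simp [pvStepA, h]
      rw [hstep, ih]
      simp [pvBlocksOf, h, pvParseFrom]
    · have hstep : pvStepA (S, s) ln = (S, pvUpd s ln) := by
        simp [pvStepA, h]
      rw [hstep, ih]
      obtain ⟨b, bs, hbs⟩ := pvBlocksOf_cons_ex ls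
      simp [pvBlocksOf, h, hbs, pvParseFrom]

-- distinct field prefixes are mutually exclusive (different first character)
theorem pvPrefix_excl {p q : List Char} {l : List Char} (hne : p.head? ≠ q.head?)
    (hp : p ≠ []) (hq : q ≠ []) (h1 : p <+: l) (h2 : q <+: l) : False := by
  cases p with
  | nil => exact hp rfl
  | cons a p' =>
    cases q with
    | nil => exact hq rfl
    | cons b q' =>
      obtain ⟨r1, e1⟩ := h1
      obtain ⟨r2, e2⟩ := h2
      rw [← e1] at e2
      simp only [List.cons_append] at e2
      injection e2 with hb _
      apply hne
      simp [hb]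

theorem pvIsT_not_pvIsC {ln : String} (h : pvIsT ln = true) : pvIsC ln = false := by
  by_contra hc
  simp only [Bool.not_eq_false] at hc
  unfold pvIsT at h; unfold pvIsC at hc
  rw [PySem.Str.startswith_eq, PySem.Chars.startswith_iff] at h hc
  exact pvPrefix_excl (by decide) (by decide) (by decide) h hc

theorem pvIsT_not_pvIsI {ln : String} (h : pvIsT ln = true) : pvIsI ln = false := by
  by_contra hc
  simp only [Bool.not_eq_false] at hc
  unfold pvIsT at h; unfold pvIsI at hc
  rw [PySem.Str.startswith_eq, PySem.Chars.startswith_iff] at h hc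
  exact pvPrefix_excl (by decide) (by decide) (by decide) h hc

theorem pvIsC_not_pvIsI {ln : String} (h : pvIsC ln = true) : pvIsI ln = false := by
  by_contra hc
  simp only [Bool.not_eq_false] at hc
  unfold pvIsC at h; unfold pvIsI at hc
  rw [PySem.Str.startswith_eq, PySem.Chars.startswith_iff] at h hc
  exact pvPrefix_excl (by decide) (by decide) (by decide) h hc

-- pvField with an arbitrary fallback (pvField block pre = pvFieldFrom "" block pre)
def pvFieldFrom (init : String) (block : List String) (pre : String) : String :=
  match ((block.filter
      (fun ln => PySem.Str.startswith (PySem.Str.lower ln) pre)).map pvExt).getLast? with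
  | some v => v
  | none => init

theorem pvFieldFrom_cons (init : String) (ln : String) (b : List String) (pre : String) :
    pvFieldFrom init (ln :: b) pre
      = if PySem.Str.startswith (PySem.Str.lower ln) pre then pvFieldFrom (pvExt ln) b pre
        else pvFieldFrom init b pre := by
  by_cases h : PySem.Str.startswith (PySem.Str.lower ln) pre = true
  · rw [if_pos h]
    unfold pvFieldFrom
    simp only [List.filter_cons, h, if_pos, List.map_cons, List.getLast?_cons]
    cases hx : ((b.filter
        (fun ln => PySem.Str.startswith (PySem.Str.lower ln) pre)).map pvExt).getLast? with
    | none => rfl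
    | some v => rfl
  · rw [if_neg h]
    have h0 : PySem.Str.startswith (PySem.Str.lower ln) pre = false := by simpa using h
    unfold pvFieldFrom
    simp only [List.filter_cons, h0, Bool.false_eq_true, if_false]

-- A's per-block left fold computes exactly B's three last-match fields
theorem pvBlockFold_eq_fields (b : List String) (s : String × String × String) :
    b.foldl pvUpd s
      = (pvFieldFrom s.1 b "title:", pvFieldFrom s.2.1 b "content:", pvFieldFrom s.2.2 b "image:") := by
  induction b generalizing s with
  | nil => simp [pvFieldFrom]
  | cons ln b ih =>
    simp only [List.foldl_cons, ih]
    rw [pvFieldFrom_cons, pvFieldFrom_cons, pvFieldFrom_cons]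
    unfold pvUpd
    by_cases hT : pvIsT ln = true
    · have hC : pvIsC ln = false := pvIsT_not_pvIsC hT
      have hI : pvIsI ln = false := pvIsT_not_pvIsI hT
      have hT' : PySem.Str.startswith (PySem.Str.lower ln) "title:" = true := hT
      have hC' : PySem.Str.startswith (PySem.Str.lower ln) "content:" = false := hC
      have hI' : PySem.Str.startswith (PySem.Str.lower ln) "image:" = false := hI
      simp only [hT, hT', hC', hI', if_pos, Bool.false_eq_true, if_false]
    · by_cases hC : pvIsC ln = true
      · have hI : pvIsI ln = false := pvIsC_not_pvIsI hC
        have hT0 : pvIsT ln = false := by simpa using hT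
        have hT' : PySem.Str.startswith (PySem.Str.lower ln) "title:" = false := hT0
        have hC' : PySem.Str.startswith (PySem.Str.lower ln) "content:" = true := hC
        have hI' : PySem.Str.startswith (PySem.Str.lower ln) "image:" = false := hI
        simp only [hT0, hT', hC, hC', hI', if_pos, Bool.false_eq_true, if_false]
      · by_cases hI : pvIsI ln = true
        · have hT0 : pvIsT ln = false := by simpa using hT
          have hC0 : pvIsC ln = false := by simpa using hC
          have hT' : PySem.Str.startswith (PySem.Str.lower ln) "title:" = false := hT0
          have hC' : PySem.Str.startswith (PySem.Str.lower ln) "content:" = false := hC0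
          have hI' : PySem.Str.startswith (PySem.Str.lower ln) "image:" = true := hI
          simp only [hT0, hC0, hT', hC', hI, hI', if_pos, Bool.false_eq_true, if_false]
        · have hT0 : pvIsT ln = false := by simpa using hT
          have hC0 : pvIsC ln = false := by simpa using hC
          have hI0 : pvIsI ln = false := by simpa using hI
          have hT' : PySem.Str.startswith (PySem.Str.lower ln) "title:" = false := hT0
          have hC' : PySem.Str.startswith (PySem.Str.lower ln) "content:" = false := hC0
          have hI' : PySem.Str.startswith (PySem.Str.lower ln) "image:" = false := hI0
          simp only [hT0, hC0, hI0, hT', hC', hI', Bool.false_eq_true, if_false]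

-- B's slide for one block is the flush of A's per-block fold started from empty fields
theorem pvSlideOf_block (b : List String) :
    (if (((pvSlideDict b).get? "title").getD "") != ""
        || (((pvSlideDict b).get? "content").getD "") != "" then
      [(pvSlideDict b).items]
    else ([] : List (List (String × String))))
    = pvFlush (b.foldl pvUpd ("", "", "")) := by
  rw [pvBlockFold_eq_fields]
  have h1 : (((pvSlideDict b).get? "title").getD "") = pvField b "title:" := rfl
  have h2 : (((pvSlideDict b).get? "content").getD "") = pvField b "content:" := rfl
  have h3 : (pvSlideDict b).items
      = [("title", pvField b "title:"), ("content", pvField b "content:"),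
         ("image", pvField b "image:")] := rfl
  rw [h1, h2, h3]
  have hT : pvField b "title:" = pvFieldFrom "" b "title:" := rfl
  have hC : pvField b "content:" = pvFieldFrom "" b "content:" := rfl
  have hI : pvField b "image:" = pvFieldFrom "" b "image:" := rfl
  rw [hT, hC, hI]
  rfl

-- B's block-building fold computes pvBlocksOf
theorem pvB_blocks (L : List String) (D : List (List String)) (C : List String) :
    (L.foldl
      (fun (st : List (List String) × List String) ln =>
        if PySem.Str.startswith (PySem.Str.lower ln) "# slide" then (st.1 ++ [st.2], [])
        else (st.1, st.2 ++ [ln])) (D, C)).1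
    ++ [(L.foldl
      (fun (st : List (List String) × List String) ln =>
        if PySem.Str.startswith (PySem.Str.lower ln) "# slide" then (st.1 ++ [st.2], [])
        else (st.1, st.2 ++ [ln])) (D, C)).2]
    = D ++ ((C ++ (pvBlocksOf L).headI) :: (pvBlocksOf L).tail) := by
  induction L generalizing D C with
  | nil => simp [pvBlocksOf]
  | cons ln ls ih =>
    simp only [List.foldl_cons]
    by_cases h : pvHdr ln = true
    · have h' : PySem.Str.startswith (PySem.Str.lower ln) "# slide" = true := h
      simp only [h', if_pos, ih]
      obtain ⟨b, bs, hbs⟩ := pvBlocksOf_cons_ex ls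
      simp [pvBlocksOf, h, hbs]
    · have h' : PySem.Str.startswith (PySem.Str.lower ln) "# slide" = false := by
        simpa [pvHdr] using h
      simp only [h', Bool.false_eq_true, if_false, ih]
      obtain ⟨b, bs, hbs⟩ := pvBlocksOf_cons_ex ls
      simp [pvBlocksOf, h, hbs]

-- B's final fold over the blocks is pvParseFrom from empty fields
theorem pvB_fold_blocks (bs : List (List String)) (S : List (List (String × String))) :
    bs.foldl
      (fun slides block =>
        if (((pvSlideDict block).get? "title").getD "") != ""
            || (((pvSlideDict block).get? "content").getD "") != "" then
          slides ++ [(pvSlideDict block).items]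
        else slides) S
    = S ++ pvParseFrom ("", "", "") bs := by
  induction bs generalizing S with
  | nil => simp [pvParseFrom]
  | cons b bs ih =>
    simp only [List.foldl_cons, ih, pvParseFrom]
    rw [← pvSlideOf_block b]
    split <;> simp

-- ===== VERDICT (by name: the statement is the Claim_ definition above) =====
theorem parse_ppt_prompt_spec : Claim_equal_parse_ppt_prompt := by
  intro text _
  show parse_ppt_prompt text = parse_ppt_prompt_alt text
  have eA : parse_ppt_prompt text
      = pvParseFrom ("", "", "")
          (pvBlocksOf ((PySem.Str.splitlines text).map PySem.Str.strip)) := by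
    simp only [parse_ppt_prompt]
    rw [pvA_dict0]
    rw [← List.foldl_map]
    set r := ((PySem.Str.splitlines text).map PySem.Str.strip).foldl pvStepA ([], ("", "", ""))
      with hr
    have hfin : (if pvFlushCond (pvDictOf r.2) then r.1 ++ [(pvDictOf r.2).items] else r.1)
        = r.1 ++ pvFlush r.2 := by
      rw [show pvFlushCond (pvDictOf r.2) = (r.2.1 != "" || r.2.2.1 != "") from rfl]
      unfold pvFlush
      split <;> simp [show (pvDictOf r.2).items = pvMk r.2 from rfl]
    rw [hfin, hr, pvA_blocks]
    simp
  have eB : parse_ppt_prompt_alt text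
      = pvParseFrom ("", "", "")
          (pvBlocksOf ((PySem.Str.splitlines text).map PySem.Str.strip)) := by
    simp only [parse_ppt_prompt_alt]
    rw [pvB_blocks, pvB_fold_blocks]
    obtain ⟨b, bs, hbs⟩ := pvBlocksOf_cons_ex ((PySem.Str.splitlines text).map PySem.Str.strip)
    simp [hbs]
  rw [eA, eB]
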